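-- pv_equiv track=rewrite | github.com/graphsignal/solver-demo | solutions/1003-F.py | compute_min_length_after_abbreviation
-- ===== SOURCE A (Python) =====
-- def compute_min_length_after_abbreviation(n, words):
--     # Helper function to compute hash for a segment of words
--     def compute_hash(words, i, j):
--         # Simple polynomial hash function for word segment
--         # Using large prime for modulus and base
--         MOD = 10**9 + 7
--         BASE = 257
--         h = 0
--         for word in words[i:j+1]:
--             for c in word:
--                 h = (h * BASE + ord(c)) % MOD
--             h = (h * BASE + 256) % MOD  # Adding separator hash value for spaces
--         return h
--
--     original_length = sum(len(word) for word in words) + (n - 1)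
--     min_length = original_length
--
--     # Mapping (hash_value, segment_length) -> list of starting indices
--     hashes = {}
--
--     # Generate hashes for all possible segments
--     for length in range(1, n):
--         for start in range(n - length + 1):
--             end = start + length - 1
--             h = compute_hash(words, start, end)
--             if (h, length) not in hashes:
--                 hashes[(h, length)] = []
--             hashes[(h, length)].append(start)
--
--     # Find two non-intersecting segments with the same hash
--     for (h, length), indices in hashes.items():
--         if len(indices) >= 2:
--             # We need at least two non-intersecting segments
--             for i in range(len(indices)):
--                 for j in range(i + 1, len(indices)):
--                     start1 = indices[i]
--                     end1 = start1 + length - 1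
--                     start2 = indices[j]
--                     end2 = start2 + length - 1
--                     if end1 < start2:  # Make sure they do not intersect
--                         # Abbreviated length calculation
--                         abbreviation_length = length  # Number of words in each
--                         new_length = (original_length - 2 * (sum(len(words[k]) for k in range(start1, end1+1)) + length - 1)
--                             + 2 * abbreviation_length)
--                         min_length = min(min_length, new_length)
--
--     return min_length
-- ===== SOURCE B (Python) =====
-- def compute_min_length_after_abbreviation(n, words):
--     MOD = 10**9 + 7
--     BASE = 257
--     orig = sum(len(w) for w in words) + (n - 1)
--     best = orig
--     # prefix sums of word lengths over the first n words
--     pref = [0]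
--     for i in range(n):
--         pref = pref + [pref[-1] + len(words[i])]
--     # h[s] holds the rolling hash of words[s:s+length-1]; it is extended by one
--     # word per round of the length loop, so no segment is ever re-hashed.
--     h = [0] * n
--     for length in range(1, n):
--         groups = {}
--         for s in range(n - length + 1):
--             hh = h[s]
--             for c in words[s + length - 1]:
--                 hh = (hh * BASE + ord(c)) % MOD
--             hh = (hh * BASE + 256) % MOD
--             h[s] = hh
--             if hh not in groups:
--                 groups[hh] = []
--             groups[hh].append(s)
--         for hh, idxs in groups.items():
--             last = idxs[-1]
--             for s in idxs:
--                 if s + length <= last: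
--                     cand = orig - 2 * (pref[s + length] - pref[s] + length - 1) + 2 * length
--                     if cand < best:
--                         best = cand
--     return best
-- ===== Notes on version B (the rewrite author's own statement) =====
-- stated objective: faster
-- what changed: Rolling hashes extended one word per length round plus prefix length sums replace A's from-scratch per-segment hashing and per-pair length re-summing, and a single linear scan of each hash group against its last start index replaces A's quadratic pair loop over the group.
-- outside the precondition, e.g. on compute_min_length_after_abbreviation(2, ['a']): A returns 2, B raises IndexError
import Mathlib
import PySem

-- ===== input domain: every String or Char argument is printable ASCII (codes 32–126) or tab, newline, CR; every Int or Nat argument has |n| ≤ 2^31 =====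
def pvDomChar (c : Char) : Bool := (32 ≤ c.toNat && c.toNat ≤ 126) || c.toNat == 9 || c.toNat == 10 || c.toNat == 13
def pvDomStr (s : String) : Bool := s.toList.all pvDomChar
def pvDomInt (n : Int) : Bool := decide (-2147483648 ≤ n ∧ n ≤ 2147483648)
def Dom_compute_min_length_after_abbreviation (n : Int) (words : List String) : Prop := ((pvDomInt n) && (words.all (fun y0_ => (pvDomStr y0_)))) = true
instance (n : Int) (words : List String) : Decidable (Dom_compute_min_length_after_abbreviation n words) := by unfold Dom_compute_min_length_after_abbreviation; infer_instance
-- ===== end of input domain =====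

-- B replaces A's from-scratch per-segment hashing, per-pair length re-summing and quadratic
-- pair scan by rolling hashes extended one word per round, prefix length sums and a single
-- linear scan per hash group against the group's last index (objective: faster).


-- ===== PORT A =====
-- body of A's inner `for word in words[i:j+1]` loop: char loop then the separator line
def pvWordStep (h : Int) (w : String) : Int :=
  PySem.Int.mod
    ((w.toList.foldl (fun h c => PySem.Int.mod (h * 257 + (c.toNat : Int)) 1000000007) h) * 257 + 256)
    1000000007

-- A's helper compute_hash(words, i, j)
def pvComputeHash (words : List String) (i j : Int) : Int :=
  (PySem.List.slice words (some i) (some (j + 1))).foldl pvWordStep 0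

def compute_min_length_after_abbreviation (n : Int) (words : List String) : Int :=
  let original_length : Int := (words.map PySem.Str.len).sum + (n - 1)
  let hashes : PySem.Dict (Int × Int) (List Int) :=
    (PySem.List.pyRange 1 n).foldl (fun hashes length =>
      (PySem.List.pyRange 0 (n - length + 1)).foldl (fun hashes start =>
        let h := pvComputeHash words start (start + length - 1)
        let hashes := if hashes.contains (h, length) then hashes else hashes.insert (h, length) []
        hashes.modify (h, length) [] (fun l => l ++ [start])) hashes)
      PySem.Dict.empty
  hashes.items.foldl (fun min_length kv =>
    let length := kv.1.2
    let indices := kv.2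
    if 2 ≤ indices.length then
      (PySem.List.pyRange 0 (PySem.List.len indices)).foldl (fun min_length i =>
        (PySem.List.pyRange (i + 1) (PySem.List.len indices)).foldl (fun min_length j =>
          let start1 := PySem.List.pyGetD indices i 0
          let end1 := start1 + length - 1
          let start2 := PySem.List.pyGetD indices j 0
          if end1 < start2 then
            min min_length (original_length
              - 2 * ((PySem.List.pyRange start1 (end1 + 1)).foldl
                       (fun a k => a + PySem.Str.len (PySem.List.pyGetD words k "")) 0 + length - 1)
              + 2 * length)
          else min_length) min_length) min_length
    else min_length) original_length

-- ===== PORT B =====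
def compute_min_length_after_abbreviation_alt (n : Int) (words : List String) : Int :=
  let orig : Int := (words.map PySem.Str.len).sum + (n - 1)
  let pref : List Int :=
    (PySem.List.pyRange 0 n).foldl (fun p i =>
      p ++ [PySem.List.pyGetD p (-1) 0 + PySem.Str.len (PySem.List.pyGetD words i "")]) [0]
  let h0 : List Int := PySem.List.pyRepeat [0] n
  let res :=
    (PySem.List.pyRange 1 n).foldl (fun (st : List Int × Int) length =>
      let inner :=
        (PySem.List.pyRange 0 (n - length + 1)).foldl
          (fun (st2 : List Int × PySem.Dict Int (List Int)) s =>
            let hh := PySem.List.pyGetD st2.1 s 0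
            let hh := (PySem.List.pyGetD words (s + length - 1) "").toList.foldl
                (fun hh c => PySem.Int.mod (hh * 257 + (c.toNat : Int)) 1000000007) hh
            let hh := PySem.Int.mod (hh * 257 + 256) 1000000007
            let harr := PySem.List.pySetD st2.1 s hh
            let groups := if st2.2.contains hh then st2.2 else st2.2.insert hh []
            (harr, groups.modify hh [] (fun l => l ++ [s])))
          (st.1, PySem.Dict.empty)
      let best :=
        inner.2.items.foldl (fun best kv =>
          let idxs := kv.2
          let last := PySem.List.pyGetD idxs (-1) 0
          idxs.foldl (fun best s =>
            if s + length ≤ last then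
              let cand := orig
                - 2 * (PySem.List.pyGetD pref (s + length) 0 - PySem.List.pyGetD pref s 0 + length - 1)
                + 2 * length
              if cand < best then cand else best
            else best) best) st.2
      (inner.1, best)) (h0, orig)
  res.2

-- ===== PRECONDITION & SPEC =====
-- Pre_ excludes n > len(words), where A indexes words[k] out of range (IndexError) on most
-- inputs and, where it happens to return, counts phantom empty segments past the list; the
-- function's natural domain is n = number of words (any n ≤ len(words) is safe).
def Pre_compute_min_length_after_abbreviation (n : Int) (words : List String) : Prop :=
  n ≤ (words.length : Int)
instance (n : Int) (words : List String) : Decidable (Pre_compute_min_length_after_abbreviation n words) := by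
  unfold Pre_compute_min_length_after_abbreviation; infer_instance

def pvWitness_compute_min_length_after_abbreviation : Int × List String := (3, ["ab", "c", "ab"])

def Spec_compute_min_length_after_abbreviation (n : Int) (words : List String) (out : Int) : Prop := out = compute_min_length_after_abbreviation_alt n words
instance (n : Int) (words : List String) (out : Int) : Decidable (Spec_compute_min_length_after_abbreviation n words out) := by unfold Spec_compute_min_length_after_abbreviation; infer_instance

-- ===== CLAIM (what is proved, stated in full; the proofs are below) =====
def Claim_equal_compute_min_length_after_abbreviation : Prop := ∀ (n : Int) (words : List String), Dom_compute_min_length_after_abbreviation n words → Pre_compute_min_length_after_abbreviation n words → Spec_compute_min_length_after_abbreviation n words (compute_min_length_after_abbreviation n words)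

-- ===== LEMMAS AND PROOFS =====

-- canonical descriptions shared by both directions of the proof
def pvHcI (words : List String) (s L : Int) : Int :=
  ((words.drop s.toNat).take L.toNat).foldl pvWordStep 0

def pvSI (words : List String) (m : Int) : Int :=
  ((words.take m.toNat).map PySem.Str.len).sum

def pvVal (n : Int) (words : List String) (L s : Int) : Int :=
  ((words.map PySem.Str.len).sum + (n - 1)) - 2 * (pvSI words (s + L) - pvSI words s + L - 1) + 2 * L

def pvSegs (n L : Int) : List Int := PySem.List.pyRange 0 (n - L + 1)

def pvGroup (words : List String) (n L c : Int) : List Int :=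
  (pvSegs n L).filter (fun s => pvHcI words s L == c)

def pvHlist (words : List String) (n L : Int) : List Int :=
  PySem.Set.ofList ((pvSegs n L).map (fun s => pvHcI words s L))

def pvItemVals (n : Int) (words : List String) (kv : (Int × Int) × List Int) : List Int :=
  (kv.2.filter (fun s => s + kv.1.2 ≤ PySem.List.pyGetD kv.2 (-1) 0)).map (pvVal n words kv.1.2)

def pvF (n : Int) (words : List String) (b : Int) (kv : (Int × Int) × List Int) : Int :=
  (pvItemVals n words kv).foldl min b

def pvItems (n : Int) (words : List String) : List ((Int × Int) × List Int) :=
  (PySem.List.pyRange 1 n).flatMap (fun L =>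
    (pvHlist words n L).map (fun c => ((c, L), pvGroup words n L c)))

def pvCanon (n : Int) (words : List String) : Int :=
  (pvItems n words).foldl (pvF n words) ((words.map PySem.Str.len).sum + (n - 1))

-- generic fold shapes ------------------------------------------------------

theorem pv_fold_if_min (p : Int → Prop) [DecidablePred p] (v : Int) :
    ∀ (l : List Int) (b : Int),
    l.foldl (fun b j => if p j then min b v else b) b = if l.any (fun j => decide (p j)) then min b v else b := by
  intro l
  induction l with
  | nil => intro b; simp
  | cons x t ih =>
    intro b
    simp only [List.foldl_cons, List.any_cons]
    by_cases h : p x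
    · simp only [h, if_pos, decide_true, Bool.true_or, ih]
      cases ht : t.any (fun j => decide (p j)) <;> simp
    · simp [h, ih]

theorem pv_gfold (p : Int → Prop) [DecidablePred p] (v : Int → Int) :
    ∀ (g : List Int) (b : Int),
    g.foldl (fun b s => if p s then min b (v s) else b) b
      = ((g.filter (fun s => decide (p s))).map v).foldl min b := by
  intro g
  induction g with
  | nil => intro b; simp
  | cons x t ih =>
    intro b
    by_cases h : p x
    · simp [h, ih]
    · simp [h, ih]

theorem pv_flatMap_single {β : Type} (l : List Int) (L : Int) (f : Int → List β)
    (hnd : l.Nodup) (hL : L ∈ l) (hz : ∀ L' ∈ l, L' ≠ L → f L' = []) :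
    l.flatMap f = f L := by
  induction l with
  | nil => cases hL
  | cons x t ih =>
    rcases List.mem_cons.mp hL with h | h
    · subst h
      have : t.flatMap f = [] := by
        apply List.flatMap_eq_nil_iff.mpr
        intro L' hL'
        exact hz L' (List.mem_cons_of_mem _ hL') (by rintro rfl; exact (List.nodup_cons.mp hnd).1 hL')
      simp [this]
    · have hx : f x = [] := hz x (List.mem_cons_self) (by rintro rfl; exact (List.nodup_cons.mp hnd).1 h)
      simp only [List.flatMap_cons, hx, List.nil_append]
      exact ih (List.nodup_cons.mp hnd).2 h (fun L' h1 h2 => hz L' (List.mem_cons_of_mem _ h1) h2)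

theorem pv_foldl_min_swap : ∀ (l : List Int) (b x : Int),
    l.foldl min (min b x) = min (l.foldl min b) x := by
  intro l
  induction l with
  | nil => intro b x; rfl
  | cons y t ih =>
    intro b x
    simp only [List.foldl_cons]
    rw [show min (min b x) y = min (min b y) x by rw [min_assoc, min_assoc, min_comm x y], ih]

theorem pv_foldl_min_comm : ∀ (l1 l2 : List Int) (b : Int),
    l2.foldl min (l1.foldl min b) = l1.foldl min (l2.foldl min b) := by
  intro l1
  induction l1 with
  | nil => intro l2 b; rfl
  | cons x t ih =>
    intro l2 b
    simp only [List.foldl_cons]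
    rw [ih l2 (min b x), pv_foldl_min_swap l2 b x, pv_foldl_min_swap t (l2.foldl min b) x]

theorem pv_perm_foldl (n : Int) (words : List String) {l1 l2 : List ((Int × Int) × List Int)}
    (h : l1.Perm l2) : ∀ (b : Int), l1.foldl (pvF n words) b = l2.foldl (pvF n words) b := by
  induction h with
  | nil => intro b; rfl
  | cons x _ ih => intro b; simp only [List.foldl_cons]; exact ih _
  | swap x y l =>
    intro b
    simp only [List.foldl_cons]
    unfold pvF
    rw [pv_foldl_min_comm]
  | trans _ _ ih1 ih2 => intro b; rw [ih1, ih2]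

theorem pv_nodup_flatMap {β : Type} (tag : β → Int) :
    ∀ (l : List Int), l.Nodup → ∀ (f : Int → List β),
    (∀ L ∈ l, (f L).Nodup) → (∀ L ∈ l, ∀ x ∈ f L, tag x = L) →
    (l.flatMap f).Nodup := by
  intro l
  induction l with
  | nil => intro _ f _ _; simp
  | cons x t ih =>
    intro hnd f hfn htag
    simp only [List.flatMap_cons]
    apply List.Nodup.append
    · exact hfn x List.mem_cons_self
    · exact ih (List.nodup_cons.mp hnd).2 f (fun L h => hfn L (List.mem_cons_of_mem _ h))
        (fun L h => htag L (List.mem_cons_of_mem _ h))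
    · intro y hy1 hy2
      obtain ⟨L', hL', hy'⟩ := List.mem_flatMap.mp hy2
      have e1 : tag y = x := htag x List.mem_cons_self y hy1
      have e2 : tag y = L' := htag L' (List.mem_cons_of_mem _ hL') y hy'
      exact (List.nodup_cons.mp hnd).1 (by rw [← e1, e2]; exact hL')

-- dict-building characterization (shared loop shape of both ports) ---------

theorem pv_dict_step {κ : Type} [BEq κ] [LawfulBEq κ] (d : PySem.Dict κ (List Int)) (k : κ) (s : Int) :
    (if d.contains k then d else d.insert k []).modify k [] (fun l => l ++ [s])
      = d.modify k [] (fun l => l ++ [s]) := by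
  by_cases h : d.contains k
  · simp [h]
  · have h' : d.contains k = false := by simpa using h
    simp only [h', Bool.false_eq_true, if_false]
    unfold PySem.Dict.modify
    rw [PySem.Dict.getD_insert_self, PySem.Dict.insert_insert_self,
        PySem.Dict.getD_of_not_contains d [] h']

theorem pv_build_eq {β κ : Type} [BEq κ] [LawfulBEq κ] (xs : List β) (key : β → κ) (vf : β → Int) :
    xs.foldl (fun d x =>
      (if d.contains (key x) then d else d.insert (key x) []).modify (key x) [] (fun l => l ++ [vf x]))
      PySem.Dict.empty
    = (xs.map (fun x => (key x, vf x))).foldl (fun d p => d.modify p.1 [] (fun l => l ++ [p.2]))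
        PySem.Dict.empty := by
  rw [List.foldl_map]
  exact PySem.List.foldl_congr_mem xs _ _ _ (fun d x _ => pv_dict_step d (key x) (vf x))

theorem pv_build_getD {β κ : Type} [BEq κ] [LawfulBEq κ] (xs : List β) (key : β → κ) (vf : β → Int) (c : κ) :
    ((xs.map (fun x => (key x, vf x))).foldl (fun d p => d.modify p.1 [] (fun l => l ++ [p.2]))
        PySem.Dict.empty).getD c []
    = (xs.filter (fun x => key x == c)).map vf := by
  rw [PySem.Dict.getD_foldl_modify_append, PySem.Dict.getD_empty, List.filter_map, List.map_map]
  simp [Function.comp_def]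

theorem pv_build_keys {β κ : Type} [BEq κ] [LawfulBEq κ] (xs : List β) (key : β → κ) (vf : β → Int) :
    ((xs.map (fun x => (key x, vf x))).foldl (fun d p => d.modify p.1 [] (fun l => l ++ [p.2]))
        PySem.Dict.empty).keys = PySem.Set.ofList (xs.map key) := by
  rw [PySem.Dict.keys_foldl_modify_key (xs.map (fun x => (key x, vf x))) Prod.fst []
        (fun _ p => (fun l => l ++ [p.2]))]
  rw [PySem.Dict.keys_empty, List.map_map]
  rw [show ((Prod.fst ∘ fun x => (key x, vf x)) : β → κ) = key from rfl]
  exact PySem.Set.update_empty _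

theorem pv_build_nodup {β κ : Type} [BEq κ] [LawfulBEq κ] (xs : List β) (key : β → κ) (vf : β → Int) :
    ((xs.map (fun x => (key x, vf x))).foldl (fun d p => d.modify p.1 [] (fun l => l ++ [p.2]))
        PySem.Dict.empty).keys.Nodup := by
  exact PySem.Dict.nodup_keys_foldl_modify_key _ Prod.fst [] (fun _ p => (fun l => l ++ [p.2])) _
    PySem.Dict.nodup_keys_empty

theorem pv_build_items {β κ : Type} [BEq κ] [LawfulBEq κ] (xs : List β) (key : β → κ) (vf : β → Int) :
    ((xs.map (fun x => (key x, vf x))).foldl (fun d p => d.modify p.1 [] (fun l => l ++ [p.2]))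
        PySem.Dict.empty).items
    = (PySem.Set.ofList (xs.map key)).map (fun c => (c, (xs.filter (fun x => key x == c)).map vf)) := by
  rw [PySem.Dict.items_eq_map_keys _ (pv_build_nodup xs key vf) [], pv_build_keys xs key vf]
  exact List.map_congr_left (fun c _ => by rw [pv_build_getD])

-- hashes, sums, prefix list -------------------------------------------------

theorem pv_hash_slice (words : List String) (s L : Int) (hs : 0 ≤ s) (hL : 0 ≤ L) :
    pvComputeHash words s (s + L - 1) = pvHcI words s L := by
  unfold pvComputeHash pvHcI
  rw [show s + L - 1 + 1 = s + L by ring]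
  rw [PySem.List.slice_toNat words hs (by omega)]
  rw [show (s + L).toNat - s.toNat = L.toNat by omega]

theorem pv_hash_ext (words : List String) (s L : Int) (hs : 0 ≤ s) (hL : 1 ≤ L)
    (hb : s + L ≤ (words.length : Int)) :
    pvHcI words s L = pvWordStep (pvHcI words s (L - 1)) (words.getD (s + L - 1).toNat "") := by
  unfold pvHcI
  have hsn : (s.toNat : Int) = s := Int.toNat_of_nonneg hs
  have hlt : (L - 1).toNat < (words.drop s.toNat).length := by
    simp only [List.length_drop]; omega
  have h1 : (words.drop s.toNat).take L.toNat
      = (words.drop s.toNat).take (L - 1).toNat ++ [words.getD (s + L - 1).toNat ""] := by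
    have hidx : s.toNat + (L - 1).toNat = (s + L - 1).toNat := by omega
    rw [show L.toNat = (L - 1).toNat + 1 by omega, List.take_add_one,
        List.getElem?_eq_getElem hlt, List.getElem_drop]
    have h2 : (s + L).toNat - 1 < words.length := by omega
    simp [List.getElem?_eq_getElem h2, show s.toNat + (L.toNat - 1) = (s + L).toNat - 1 by omega]
  rw [h1, List.foldl_append]
  rfl

theorem pv_SI_succ (words : List String) (m : Nat) (hm : m < words.length) :
    pvSI words ((m : Int) + 1) = pvSI words (m : Int) + PySem.Str.len (words.getD m "") := by
  unfold pvSI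
  rw [show ((m : Int) + 1).toNat = m + 1 by omega, Int.toNat_natCast, List.map_take,
      List.map_take, List.sum_take_succ _ _ (by simpa using hm)]
  simp [List.getElem?_eq_getElem hm]

theorem pv_sum_range (words : List String) (s : Int) (hs : 0 ≤ s) :
    ∀ (L : Nat), s + L ≤ (words.length : Int) →
    (PySem.List.pyRange s (s + L)).foldl
        (fun a k => a + PySem.Str.len (PySem.List.pyGetD words k "")) 0
      = pvSI words (s + L) - pvSI words s := by
  intro L
  induction L with
  | zero =>
    intro _
    rw [show s + ((0 : Nat) : Int) = s by push_cast; ring, PySem.List.pyRange_one_eq_nil le_rfl]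
    simp
  | succ m ih =>
    intro hb
    have hm : s + (m : Int) ≤ (words.length : Int) := by push_cast at hb ⊢; omega
    have hsm : (s + m).toNat < words.length := by omega
    rw [show s + ((m + 1 : Nat) : Int) = (s + m) + 1 by push_cast; ring,
        PySem.List.pyRange_one_succ_right (by omega), List.foldl_append]
    simp only [List.foldl_cons, List.foldl_nil]
    rw [ih hm]
    rw [PySem.List.pyGetD_eq_getElem words "" (by omega) (by omega)]
    have h2 := pv_SI_succ words (s + m).toNat hsm
    rw [show ((((s+m).toNat : Nat)) : Int) = s + m by omega] at h2
    rw [h2, List.getD_eq_getElem words "" hsm]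
    ring

theorem pv_pref_nat (words : List String) :
    ∀ (m : Nat), m ≤ words.length →
    (PySem.List.pyRange 0 (m : Int)).foldl (fun p i =>
        p ++ [PySem.List.pyGetD p (-1) 0 + PySem.Str.len (PySem.List.pyGetD words i "")]) [0]
      = (List.range (m + 1)).map (fun k : Nat => pvSI words (k : Int)) := by
  intro m
  induction m with
  | zero =>
    intro _
    rw [show ((0 : Nat) : Int) = 0 by norm_num, PySem.List.pyRange_one_eq_nil le_rfl]
    simp [pvSI]
  | succ m ih =>
    intro hb
    rw [show ((m + 1 : Nat) : Int) = (m : Int) + 1 by push_cast; ring,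
        PySem.List.pyRange_one_succ_right (by omega), List.foldl_append, ih (by omega)]
    simp only [List.foldl_cons, List.foldl_nil]
    have hlast : PySem.List.pyGetD ((List.range (m + 1)).map (fun k : Nat => pvSI words (k : Int))) (-1) (0:Int)
        = pvSI words (m : Int) := by
      rw [List.range_succ]
      simp only [List.map_append, List.map_cons, List.map_nil]
      simp [PySem.List.pyGetD_neg_one_append_singleton]
    rw [hlast]
    rw [PySem.List.pyGetD_eq_getElem words "" (by omega) (by exact_mod_cast hb)]
    have hsucc := pv_SI_succ words m (by omega)
    rw [List.range_succ (n := m + 1)]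
    simp only [List.map_append, List.map_cons, List.map_nil]
    congr 1
    simp only [List.cons.injEq, and_true]
    rw [show (((m + 1 : Nat)) : Int) = (m : Int) + 1 by push_cast; ring, hsucc,
        List.getD_eq_getElem words "" (by omega)]
    simp [Int.toNat_natCast]

theorem pv_pref_get (n : Int) (words : List String) (hn : n ≤ (words.length : Int))
    (x : Int) (hx0 : 0 ≤ x) (hxn : x ≤ n) :
    PySem.List.pyGetD
      ((PySem.List.pyRange 0 n).foldl (fun p i =>
        p ++ [PySem.List.pyGetD p (-1) 0 + PySem.Str.len (PySem.List.pyGetD words i "")]) [0]) x 0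
      = pvSI words x := by
  have hn0 : 0 ≤ n := le_trans hx0 hxn
  rw [show n = (n.toNat : Int) by omega]
  rw [pv_pref_nat words n.toNat (by omega)]
  rw [PySem.List.pyGetD_eq_getElem _ 0 hx0 (by simp [List.length_map, List.length_range]; omega)]
  rw [List.getElem_map, List.getElem_range]
  congr 1
  omega

-- group facts ---------------------------------------------------------------

theorem pv_group_sorted (words : List String) (n L c : Int) :
    (pvGroup words n L c).Pairwise (· < ·) := by
  unfold pvGroup pvSegs
  exact (PySem.List.pairwise_lt_pyRange_one 0 (n - L + 1)).filter _

theorem pv_group_mem (words : List String) (n L c : Int) {s : Int} (h : s ∈ pvGroup words n L c) :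
    0 ≤ s ∧ s ≤ n - L := by
  unfold pvGroup pvSegs at h
  have hb := PySem.List.mem_pyRange_one.mp (List.mem_filter.mp h).1
  omega

theorem pv_last_max {g : List Int} (hg : g.Pairwise (· < ·)) {x : Int} (hx : x ∈ g) :
    x ≤ PySem.List.pyGetD g (-1) 0 := by
  have hne : g ≠ [] := by rintro rfl; cases hx
  rw [PySem.List.pyGetD_neg_one g 0 hne]
  obtain ⟨i, hi, rfl⟩ := List.mem_iff_getElem.mp hx
  rw [List.getLast_eq_getElem]
  by_cases hc : i = g.length - 1
  · subst hc; exact le_refl _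
  · exact le_of_lt (List.pairwise_iff_getElem.mp hg i (g.length - 1) hi (by omega) (by omega))

-- the core group lemma: A's guarded pair loops = fold of min over the candidate values
theorem pv_pairloop (L : Int) (hL : 1 ≤ L) (g : List Int) (hg : g.Pairwise (· < ·))
    (val : Int → Int) (best : Int) :
    (if 2 ≤ g.length then
      (PySem.List.pyRange 0 (PySem.List.len g)).foldl (fun b i =>
        (PySem.List.pyRange (i + 1) (PySem.List.len g)).foldl (fun b j =>
          if PySem.List.pyGetD g i 0 + L - 1 < PySem.List.pyGetD g j 0 then
            min b (val (PySem.List.pyGetD g i 0))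
          else b) b) best
     else best)
    = ((g.filter (fun s => s + L ≤ PySem.List.pyGetD g (-1) 0)).map val).foldl min best := by
  by_cases hlen : 2 ≤ g.length
  · rw [if_pos hlen]
    have hne : g ≠ [] := by intro h; subst h; simp at hlen
    have hcong : ∀ (b : Int), ∀ i ∈ PySem.List.pyRange 0 (PySem.List.len g),
        (PySem.List.pyRange (i + 1) (PySem.List.len g)).foldl (fun b j =>
          if PySem.List.pyGetD g i 0 + L - 1 < PySem.List.pyGetD g j 0 then
            min b (val (PySem.List.pyGetD g i 0))
          else b) b
        = (fun (b : Int) (x : Int) =>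
            if x + L ≤ PySem.List.pyGetD g (-1) 0 then min b (val x) else b) b
            (PySem.List.pyGetD g i 0) := by
      intro b i hi
      rw [PySem.List.len_eq] at hi
      have hib := PySem.List.mem_pyRange_one.mp hi
      rw [pv_fold_if_min (fun j => PySem.List.pyGetD g i 0 + L - 1 < PySem.List.pyGetD g j 0)
            (val (PySem.List.pyGetD g i 0))]
      refine if_congr ?_ rfl rfl
      rw [List.any_eq_true]
      constructor
      · rintro ⟨j, hj, hPj⟩
        rw [PySem.List.len_eq] at hj
        have hjb := PySem.List.mem_pyRange_one.mp hj
        have hPj' := of_decide_eq_true hPj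
        have hjm : PySem.List.pyGetD g j 0 ∈ g := by
          rw [PySem.List.pyGetD_eq_getElem g 0 (by omega) (by omega)]
          exact List.getElem_mem _
        have := pv_last_max hg hjm
        omega
      · intro hcnd
        have hgi : PySem.List.pyGetD g i 0 = g[i.toNat] :=
          PySem.List.pyGetD_eq_getElem g 0 (by omega) (by omega)
        have hlast : PySem.List.pyGetD g (-1) 0 = g[g.length - 1] := by
          rw [PySem.List.pyGetD_neg_one g 0 hne, List.getLast_eq_getElem]
        rw [hgi, hlast] at hcnd
        have hitop : i.toNat < g.length - 1 := by
          rcases Nat.lt_or_ge i.toNat (g.length - 1) with h | h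
          · exact h
          · exfalso
            have h2 : i.toNat = g.length - 1 := by omega
            have h3 : g[i.toNat]? = g[g.length - 1]? := by rw [h2]
            rw [List.getElem?_eq_getElem (by omega), List.getElem?_eq_getElem (by omega)] at h3
            have h4 := Option.some.inj h3
            omega
        refine ⟨((g.length - 1 : Nat) : Int), ?_, ?_⟩
        · rw [PySem.List.len_eq, PySem.List.mem_pyRange_one]
          omega
        · apply decide_eq_true
          have hj : PySem.List.pyGetD g ((g.length - 1 : Nat) : Int) 0 = g[g.length - 1] := by
            rw [PySem.List.pyGetD_natCast, List.getD_eq_getElem g 0 (by omega)]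
          rw [hgi, hj]
          omega
    rw [PySem.List.foldl_congr_mem _ _ _ best hcong]
    rw [PySem.List.foldl_pyRange_zero_pyGetD g 0
      (fun (b : Int) (x : Int) =>
        if x + L ≤ PySem.List.pyGetD g (-1) 0 then min b (val x) else b) best]
    exact pv_gfold (fun s => s + L ≤ PySem.List.pyGetD g (-1) 0) val g best
  · rw [if_neg hlen]
    match g with
    | [] => simp
    | [x] =>
      have hx : ¬ (x + L ≤ PySem.List.pyGetD [x] (-1) 0) := by
        rw [PySem.List.pyGetD_neg_one [x] 0 (by simp)]
        simp only [List.getLast_singleton]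
        omega
      simp [hx]
    | a :: b :: t => simp at hlen

-- A equals the canonical form ----------------------------------------------

theorem pv_filter_group (n : Int) (words : List String) (c0 L0 : Int)
    (hL : L0 ∈ PySem.List.pyRange 1 n) :
    ((((PySem.List.pyRange 1 n).flatMap (fun L => (pvSegs n L).map (fun s => (L, s)))).filter
        (fun p => ((pvHcI words p.2 p.1, p.1) : Int × Int) == (c0, L0))).map (fun p => p.2))
    = pvGroup words n L0 c0 := by
  rw [List.filter_flatMap]
  rw [pv_flatMap_single (PySem.List.pyRange 1 n) L0 _ (PySem.List.nodup_pyRange_one 1 n) hL ?_]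
  · rw [List.filter_map, List.map_map]
    rw [List.filter_congr (q := fun s => pvHcI words s L0 == c0) ?_]
    · simp [Function.comp_def, pvGroup]
    · intro s _
      simp only [Function.comp_apply]
      by_cases h : pvHcI words s L0 = c0
      · simp [h]
      · simp [h]
  · intro L' _ hne
    rw [List.filter_map]
    apply List.map_eq_nil_iff.mpr
    apply List.filter_eq_nil_iff.mpr
    intro s _
    simp only [Function.comp_apply]
    simp [Prod.ext_iff, hne]

theorem pv_keys_iff (n : Int) (words : List String) (k : Int × Int) :
    k ∈ PySem.Set.ofList ((((PySem.List.pyRange 1 n).flatMap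
          (fun L => (pvSegs n L).map (fun s => (L, s)))).map
        (fun p => ((pvHcI words p.2 p.1, p.1) : Int × Int))))
    ↔ (k.2 ∈ PySem.List.pyRange 1 n ∧ k.1 ∈ pvHlist words n k.2) := by
  rw [PySem.Set.mem_ofList, List.mem_map]
  constructor
  · rintro ⟨p, hp, rfl⟩
    obtain ⟨L, hL, hm⟩ := List.mem_flatMap.mp hp
    obtain ⟨s, hs, rfl⟩ := List.mem_map.mp hm
    refine ⟨hL, ?_⟩
    unfold pvHlist
    rw [PySem.Set.mem_ofList]
    exact List.mem_map.mpr ⟨s, hs, rfl⟩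
  · rintro ⟨h2, h1⟩
    unfold pvHlist at h1
    rw [PySem.Set.mem_ofList] at h1
    obtain ⟨s, hs, hc⟩ := List.mem_map.mp h1
    exact ⟨(k.2, s), List.mem_flatMap.mpr ⟨k.2, h2, List.mem_map.mpr ⟨s, hs, rfl⟩⟩, by simp [hc]⟩

theorem pv_val_eq (n : Int) (words : List String) (hn : n ≤ (words.length : Int)) (L s : Int)
    (hL : 1 ≤ L) (hs0 : 0 ≤ s) (hsb : s ≤ n - L) :
    ((words.map PySem.Str.len).sum + (n - 1))
      - 2 * ((PySem.List.pyRange s (s + L - 1 + 1)).foldl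
               (fun a k => a + PySem.Str.len (PySem.List.pyGetD words k "")) 0 + L - 1)
      + 2 * L
    = pvVal n words L s := by
  rw [show s + L - 1 + 1 = s + L by ring]
  have h := pv_sum_range words s hs0 L.toNat (by omega)
  rw [show ((L.toNat : Nat) : Int) = L by omega] at h
  rw [h]
  rfl

theorem pv_nodup_items (n : Int) (words : List String) : (pvItems n words).Nodup := by
  unfold pvItems
  apply pv_nodup_flatMap (fun kv => kv.1.2) _ (PySem.List.nodup_pyRange_one 1 n)
  · intro L _
    apply List.Nodup.map ?_ (PySem.Set.nodup_ofList _)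
    intro a b h
    exact (Prod.mk.injEq _ _ _ _).mp ((Prod.mk.injEq _ _ _ _).mp h).1 |>.1
  · intro L _ kv hkv
    obtain ⟨c, _, rfl⟩ := List.mem_map.mp hkv
    rfl

theorem pv_mem_items (n : Int) (words : List String) (kv : (Int × Int) × List Int) :
    kv ∈ pvItems n words
    ↔ (kv.1.2 ∈ PySem.List.pyRange 1 n ∧ kv.1.1 ∈ pvHlist words n kv.1.2
        ∧ kv.2 = pvGroup words n kv.1.2 kv.1.1) := by
  unfold pvItems
  rw [List.mem_flatMap]
  constructor
  · rintro ⟨L, hL, hm⟩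
    obtain ⟨c, hc, rfl⟩ := List.mem_map.mp hm
    exact ⟨hL, hc, rfl⟩
  · rintro ⟨h1, h2, h3⟩
    refine ⟨kv.1.2, h1, List.mem_map.mpr ⟨kv.1.1, h2, ?_⟩⟩
    rw [← h3]

theorem pv_A_eq_canon (n : Int) (words : List String)
    (hn : n ≤ (words.length : Int)) :
    compute_min_length_after_abbreviation n words = pvCanon n words := by
  have hbuild :
      (PySem.List.pyRange 1 n).foldl (fun hashes length =>
        (PySem.List.pyRange 0 (n - length + 1)).foldl (fun hashes start =>
          (if hashes.contains (pvComputeHash words start (start + length - 1), length) then hashes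
           else hashes.insert (pvComputeHash words start (start + length - 1), length) []).modify
            (pvComputeHash words start (start + length - 1), length) [] (fun l => l ++ [start]))
          hashes) PySem.Dict.empty
      = (((PySem.List.pyRange 1 n).flatMap (fun L => (pvSegs n L).map (fun s => (L, s)))).map
          (fun p => (((pvHcI words p.2 p.1, p.1) : Int × Int), p.2))).foldl
          (fun d p => d.modify p.1 [] (fun l => l ++ [p.2])) PySem.Dict.empty := by
    rw [List.foldl_map, List.foldl_flatMap]
    apply PySem.List.foldl_congr_mem
    intro d L hLm
    rw [List.foldl_map]
    unfold pvSegs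
    apply PySem.List.foldl_congr_mem
    intro d' s hsm
    have hs0 := (PySem.List.mem_pyRange_one.mp hsm).1
    have h1L := (PySem.List.mem_pyRange_one.mp hLm).1
    rw [pv_hash_slice words s L hs0 (by omega)]
    exact pv_dict_step d' _ s
  unfold compute_min_length_after_abbreviation
  simp only []
  rw [hbuild]
  rw [pv_build_items ((PySem.List.pyRange 1 n).flatMap (fun L => (pvSegs n L).map (fun s => (L, s))))
        (fun p => ((pvHcI words p.2 p.1, p.1) : Int × Int)) (fun p => p.2)]
  rw [List.foldl_map]
  rw [PySem.List.foldl_congr_mem _ _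
      (fun (best : Int) (k : Int × Int) => pvF n words best (k, pvGroup words n k.2 k.1)) _ ?_]
  · rw [← List.foldl_map (f := fun k : Int × Int => (k, pvGroup words n k.2 k.1))
        (g := pvF n words)]
    apply pv_perm_foldl n words
    rw [List.perm_ext_iff_of_nodup ?_ (pv_nodup_items n words)]
    · intro kv
      rw [pv_mem_items]
      constructor
      · intro hm
        obtain ⟨k, hk, rfl⟩ := List.mem_map.mp hm
        have := (pv_keys_iff n words k).mp hk
        exact ⟨this.1, this.2, rfl⟩
      · rintro ⟨h1, h2, h3⟩
        refine List.mem_map.mpr ⟨kv.1, (pv_keys_iff n words kv.1).mpr ⟨h1, h2⟩, ?_⟩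
        rw [← h3]
    · apply List.Nodup.map ?_ (PySem.Set.nodup_ofList _)
      intro a b h
      exact ((Prod.mk.injEq _ _ _ _).mp h).1
  · intro best k hk
    have hkk := (pv_keys_iff n words k).mp hk
    obtain ⟨c0, L0⟩ := k
    simp only at hkk
    have hL0 := PySem.List.mem_pyRange_one.mp hkk.1
    rw [pv_filter_group n words c0 L0 hkk.1]
    rw [pv_pairloop L0 (by omega) (pvGroup words n L0 c0) (pv_group_sorted words n L0 c0)
        (fun x => ((words.map PySem.Str.len).sum + (n - 1))
          - 2 * ((PySem.List.pyRange x (x + L0 - 1 + 1)).foldl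
                   (fun a k => a + PySem.Str.len (PySem.List.pyGetD words k "")) 0 + L0 - 1)
          + 2 * L0) best]
    unfold pvF pvItemVals
    simp only []
    rw [List.map_congr_left ?_]
    intro s hs
    have hsg : s ∈ pvGroup words n L0 c0 := List.mem_of_mem_filter hs
    have hsb := pv_group_mem words n L0 c0 hsg
    exact pv_val_eq n words hn L0 s (by omega) hsb.1 hsb.2

-- B equals the canonical form ----------------------------------------------

theorem pv_if_min (a b : Int) : (if a < b then a else b) = min b a := by
  rw [Int.min_def]
  split_ifs <;> omega

theorem pv_getD_setD (xs : List Int) (t u v : Int) (ht0 : 0 ≤ t) (hu0 : 0 ≤ u)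
    (ht : t < (xs.length : Int)) :
    PySem.List.pyGetD (PySem.List.pySetD xs t v) u 0
      = if u = t then v else PySem.List.pyGetD xs u 0 := by
  by_cases h : u = t
  · subst h
    rw [if_pos rfl, show u = ((u.toNat : Nat) : Int) by omega,
        PySem.List.pyGetD_pySetD_natCast xs u.toNat u.toNat v 0 (by omega)]
    simp
  · rw [if_neg h, show t = ((t.toNat : Nat) : Int) by omega,
        show u = ((u.toNat : Nat) : Int) by omega,
        PySem.List.pyGetD_pySetD_natCast xs t.toNat u.toNat v 0 (by omega)]
    rw [if_neg (by omega)]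

theorem pv_hh_eq (n : Int) (words : List String) (hn : n ≤ (words.length : Int)) (L s : Int)
    (hL : 1 ≤ L) (hs0 : 0 ≤ s) (hsb : s ≤ n - L)
    (harr : List Int) (hha : PySem.List.pyGetD harr s 0 = pvHcI words s (L - 1)) :
    PySem.Int.mod ((PySem.List.pyGetD words (s + L - 1) "").toList.foldl
        (fun hh c => PySem.Int.mod (hh * 257 + (c.toNat : Int)) 1000000007)
        (PySem.List.pyGetD harr s 0) * 257 + 256) 1000000007
      = pvHcI words s L := by
  rw [hha]
  rw [PySem.List.pyGetD_eq_getElem words "" (by omega) (by omega)]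
  rw [pv_hash_ext words s L hs0 hL (by omega)]
  rw [List.getD_eq_getElem words "" (by omega)]
  rfl

theorem pv_inner (n : Int) (words : List String) (hn : n ≤ (words.length : Int))
    (L : Int) (hL : 1 ≤ L) :
    ∀ (m : Nat) (t : Int) (harr : List Int) (d : PySem.Dict Int (List Int)),
    0 ≤ t → t + (m : Int) = n - L + 1 →
    harr.length = n.toNat →
    (∀ u : Int, 0 ≤ u → u < t → PySem.List.pyGetD harr u 0 = pvHcI words u L) →
    (∀ u : Int, t ≤ u → u ≤ n - L → PySem.List.pyGetD harr u 0 = pvHcI words u (L - 1)) →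
    (((PySem.List.pyRange t (n - L + 1)).foldl
        (fun (st2 : List Int × PySem.Dict Int (List Int)) s =>
          (PySem.List.pySetD st2.1 s (PySem.Int.mod ((PySem.List.pyGetD words (s + L - 1) "").toList.foldl (fun hh c => PySem.Int.mod (hh * 257 + (c.toNat : Int)) 1000000007) (PySem.List.pyGetD st2.1 s 0) * 257 + 256) 1000000007),
           (if st2.2.contains (PySem.Int.mod ((PySem.List.pyGetD words (s + L - 1) "").toList.foldl (fun hh c => PySem.Int.mod (hh * 257 + (c.toNat : Int)) 1000000007) (PySem.List.pyGetD st2.1 s 0) * 257 + 256) 1000000007) then st2.2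
            else st2.2.insert (PySem.Int.mod ((PySem.List.pyGetD words (s + L - 1) "").toList.foldl (fun hh c => PySem.Int.mod (hh * 257 + (c.toNat : Int)) 1000000007) (PySem.List.pyGetD st2.1 s 0) * 257 + 256) 1000000007) []).modify (PySem.Int.mod ((PySem.List.pyGetD words (s + L - 1) "").toList.foldl (fun hh c => PySem.Int.mod (hh * 257 + (c.toNat : Int)) 1000000007) (PySem.List.pyGetD st2.1 s 0) * 257 + 256) 1000000007) [] (fun l => l ++ [s]))) (harr, d)).2
      = (PySem.List.pyRange t (n - L + 1)).foldl
          (fun d s => (if d.contains (pvHcI words s L) then d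
            else d.insert (pvHcI words s L) []).modify (pvHcI words s L) [] (fun l => l ++ [s])) d)
    ∧ ((PySem.List.pyRange t (n - L + 1)).foldl
        (fun (st2 : List Int × PySem.Dict Int (List Int)) s =>
          (PySem.List.pySetD st2.1 s (PySem.Int.mod ((PySem.List.pyGetD words (s + L - 1) "").toList.foldl (fun hh c => PySem.Int.mod (hh * 257 + (c.toNat : Int)) 1000000007) (PySem.List.pyGetD st2.1 s 0) * 257 + 256) 1000000007),
           (if st2.2.contains (PySem.Int.mod ((PySem.List.pyGetD words (s + L - 1) "").toList.foldl (fun hh c => PySem.Int.mod (hh * 257 + (c.toNat : Int)) 1000000007) (PySem.List.pyGetD st2.1 s 0) * 257 + 256) 1000000007) then st2.2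
            else st2.2.insert (PySem.Int.mod ((PySem.List.pyGetD words (s + L - 1) "").toList.foldl (fun hh c => PySem.Int.mod (hh * 257 + (c.toNat : Int)) 1000000007) (PySem.List.pyGetD st2.1 s 0) * 257 + 256) 1000000007) []).modify (PySem.Int.mod ((PySem.List.pyGetD words (s + L - 1) "").toList.foldl (fun hh c => PySem.Int.mod (hh * 257 + (c.toNat : Int)) 1000000007) (PySem.List.pyGetD st2.1 s 0) * 257 + 256) 1000000007) [] (fun l => l ++ [s]))) (harr, d)).1.length = n.toNat
    ∧ (∀ u : Int, 0 ≤ u → u ≤ n - L →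
        PySem.List.pyGetD ((PySem.List.pyRange t (n - L + 1)).foldl
        (fun (st2 : List Int × PySem.Dict Int (List Int)) s =>
          (PySem.List.pySetD st2.1 s (PySem.Int.mod ((PySem.List.pyGetD words (s + L - 1) "").toList.foldl (fun hh c => PySem.Int.mod (hh * 257 + (c.toNat : Int)) 1000000007) (PySem.List.pyGetD st2.1 s 0) * 257 + 256) 1000000007),
           (if st2.2.contains (PySem.Int.mod ((PySem.List.pyGetD words (s + L - 1) "").toList.foldl (fun hh c => PySem.Int.mod (hh * 257 + (c.toNat : Int)) 1000000007) (PySem.List.pyGetD st2.1 s 0) * 257 + 256) 1000000007) then st2.2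
            else st2.2.insert (PySem.Int.mod ((PySem.List.pyGetD words (s + L - 1) "").toList.foldl (fun hh c => PySem.Int.mod (hh * 257 + (c.toNat : Int)) 1000000007) (PySem.List.pyGetD st2.1 s 0) * 257 + 256) 1000000007) []).modify (PySem.Int.mod ((PySem.List.pyGetD words (s + L - 1) "").toList.foldl (fun hh c => PySem.Int.mod (hh * 257 + (c.toNat : Int)) 1000000007) (PySem.List.pyGetD st2.1 s 0) * 257 + 256) 1000000007) [] (fun l => l ++ [s]))) (harr, d)).1 u 0 = pvHcI words u L) := by
  intro m
  induction m with
  | zero =>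
    intro t harr d ht0 htm hlen hdone htodo
    rw [PySem.List.pyRange_one_eq_nil (by omega)]
    exact ⟨rfl, hlen, fun u hu0 hub => hdone u hu0 (by omega)⟩
  | succ m ih =>
    intro t harr d ht0 htm hlen hdone htodo
    have htn : t < n - L + 1 := by push_cast at htm; omega
    have htb : t ≤ n - L := by omega
    have hhh := pv_hh_eq n words hn L t hL ht0 htb harr (htodo t le_rfl htb)
    rw [PySem.List.pyRange_one_cons htn]
    simp only [List.foldl_cons]
    rw [hhh]
    have hlen' : (PySem.List.pySetD harr t (pvHcI words t L)).length = n.toNat := by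
      rw [PySem.List.length_pySetD]; exact hlen
    have htlt : t < ((PySem.List.pySetD harr t (pvHcI words t L)).length : Int) := by
      rw [hlen']; omega
    have htlt0 : t < ((harr.length : Nat) : Int) := by rw [hlen]; omega
    exact ih (t + 1) (PySem.List.pySetD harr t (pvHcI words t L)) _
      (by omega) (by push_cast at htm ⊢; omega) hlen'
      (fun u hu0 hub => by
        rw [pv_getD_setD harr t u _ ht0 hu0 htlt0]
        by_cases hc : u = t
        · simp [hc]
        · rw [if_neg hc]
          exact hdone u hu0 (by omega))
      (fun u hu0 hub => by
        rw [pv_getD_setD harr t u _ ht0 (by omega) htlt0]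
        rw [if_neg (by omega)]
        exact htodo u (by omega) hub)

theorem pv_groupbody (n : Int) (words : List String) (hn : n ≤ (words.length : Int)) (L : Int)
    (hL : 1 ≤ L) (c : Int) (best : Int) :
    (pvGroup words n L c).foldl (fun best s =>
      if s + L ≤ PySem.List.pyGetD (pvGroup words n L c) (-1) 0 then
        (if ((words.map PySem.Str.len).sum + (n - 1)) - 2 * (PySem.List.pyGetD ((PySem.List.pyRange 0 n).foldl (fun p i => p ++ [PySem.List.pyGetD p (-1) 0 + PySem.Str.len (PySem.List.pyGetD words i "")]) [0]) (s + L) 0 - PySem.List.pyGetD ((PySem.List.pyRange 0 n).foldl (fun p i => p ++ [PySem.List.pyGetD p (-1) 0 + PySem.Str.len (PySem.List.pyGetD words i "")]) [0]) s 0 + L - 1) + 2 * L < best then ((words.map PySem.Str.len).sum + (n - 1)) - 2 * (PySem.List.pyGetD ((PySem.List.pyRange 0 n).foldl (fun p i => p ++ [PySem.List.pyGetD p (-1) 0 + PySem.Str.len (PySem.List.pyGetD words i "")]) [0]) (s + L) 0 - PySem.List.pyGetD ((PySem.List.pyRange 0 n).foldl (fun p i => p ++ [PySem.List.pyGetD p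 (-1) 0 + PySem.Str.len (PySem.List.pyGetD words i "")]) [0]) s 0 + L - 1) + 2 * L else best)
      else best) best
    = pvF n words best ((c, L), pvGroup words n L c) := by
  rw [PySem.List.foldl_congr_mem _ _
      (fun (b : Int) (s : Int) =>
        if s + L ≤ PySem.List.pyGetD (pvGroup words n L c) (-1) 0 then min b (pvVal n words L s)
        else b) best ?_]
  · rw [pv_gfold (fun s => s + L ≤ PySem.List.pyGetD (pvGroup words n L c) (-1) 0)
        (pvVal n words L) (pvGroup words n L c) best]
    rfl
  · intro b s hs
    have hsb := pv_group_mem words n L c hs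
    have hcand : ((words.map PySem.Str.len).sum + (n - 1)) - 2 * (PySem.List.pyGetD ((PySem.List.pyRange 0 n).foldl (fun p i => p ++ [PySem.List.pyGetD p (-1) 0 + PySem.Str.len (PySem.List.pyGetD words i "")]) [0]) (s + L) 0 - PySem.List.pyGetD ((PySem.List.pyRange 0 n).foldl (fun p i => p ++ [PySem.List.pyGetD p (-1) 0 + PySem.Str.len (PySem.List.pyGetD words i "")]) [0]) s 0 + L - 1) + 2 * L = pvVal n words L s := by
      rw [pv_pref_get n words hn (s + L) (by omega) (by omega),
          pv_pref_get n words hn s (by omega) (by omega)]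
      rfl
    rw [hcand, pv_if_min]

theorem pv_outer (n : Int) (words : List String) (hn : n ≤ (words.length : Int)) :
    ∀ (m : Nat) (t : Int) (harr : List Int) (best : Int),
    1 ≤ t → t + (m : Int) = n →
    harr.length = n.toNat →
    (∀ u : Int, 0 ≤ u → u ≤ n - t → PySem.List.pyGetD harr u 0 = pvHcI words u (t - 1)) →
    ((PySem.List.pyRange t n).foldl
      (fun (st : List Int × Int) length =>
        (((PySem.List.pyRange 0 (n - length + 1)).foldl
          (fun (st2 : List Int × PySem.Dict Int (List Int)) s =>
            (PySem.List.pySetD st2.1 s (PySem.Int.mod ((PySem.List.pyGetD words (s + length - 1) "").toList.foldl (fun hh c => PySem.Int.mod (hh * 257 + (c.toNat : Int)) 1000000007) (PySem.List.pyGetD st2.1 s 0) * 257 + 256) 1000000007),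
             (if st2.2.contains (PySem.Int.mod ((PySem.List.pyGetD words (s + length - 1) "").toList.foldl (fun hh c => PySem.Int.mod (hh * 257 + (c.toNat : Int)) 1000000007) (PySem.List.pyGetD st2.1 s 0) * 257 + 256) 1000000007) then st2.2
              else st2.2.insert (PySem.Int.mod ((PySem.List.pyGetD words (s + length - 1) "").toList.foldl (fun hh c => PySem.Int.mod (hh * 257 + (c.toNat : Int)) 1000000007) (PySem.List.pyGetD st2.1 s 0) * 257 + 256) 1000000007) []).modify (PySem.Int.mod ((PySem.List.pyGetD words (s + length - 1) "").toList.foldl (fun hh c => PySem.Int.mod (hh * 257 + (c.toNat : Int)) 1000000007) (PySem.List.pyGetD st2.1 s 0) * 257 + 256) 1000000007) [] (fun l => l ++ [s]))) (st.1, PySem.Dict.empty)).1,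
         (((PySem.List.pyRange 0 (n - length + 1)).foldl
          (fun (st2 : List Int × PySem.Dict Int (List Int)) s =>
            (PySem.List.pySetD st2.1 s (PySem.Int.mod ((PySem.List.pyGetD words (s + length - 1) "").toList.foldl (fun hh c => PySem.Int.mod (hh * 257 + (c.toNat : Int)) 1000000007) (PySem.List.pyGetD st2.1 s 0) * 257 + 256) 1000000007),
             (if st2.2.contains (PySem.Int.mod ((PySem.List.pyGetD words (s + length - 1) "").toList.foldl (fun hh c => PySem.Int.mod (hh * 257 + (c.toNat : Int)) 1000000007) (PySem.List.pyGetD st2.1 s 0) * 257 + 256) 1000000007) then st2.2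
              else st2.2.insert (PySem.Int.mod ((PySem.List.pyGetD words (s + length - 1) "").toList.foldl (fun hh c => PySem.Int.mod (hh * 257 + (c.toNat : Int)) 1000000007) (PySem.List.pyGetD st2.1 s 0) * 257 + 256) 1000000007) []).modify (PySem.Int.mod ((PySem.List.pyGetD words (s + length - 1) "").toList.foldl (fun hh c => PySem.Int.mod (hh * 257 + (c.toNat : Int)) 1000000007) (PySem.List.pyGetD st2.1 s 0) * 257 + 256) 1000000007) [] (fun l => l ++ [s]))) (st.1, PySem.Dict.empty)).2.items).foldl
          (fun (best : Int) (kv : Int × List Int) => kv.2.foldl (fun best s =>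
            if s + length ≤ PySem.List.pyGetD kv.2 (-1) 0 then
              (if ((words.map PySem.Str.len).sum + (n - 1)) - 2 * (PySem.List.pyGetD ((PySem.List.pyRange 0 n).foldl (fun p i => p ++ [PySem.List.pyGetD p (-1) 0 + PySem.Str.len (PySem.List.pyGetD words i "")]) [0]) (s + length) 0 - PySem.List.pyGetD ((PySem.List.pyRange 0 n).foldl (fun p i => p ++ [PySem.List.pyGetD p (-1) 0 + PySem.Str.len (PySem.List.pyGetD words i "")]) [0]) s 0 + length - 1) + 2 * length < best then ((words.map PySem.Str.len).sum + (n - 1)) - 2 * (PySem.List.pyGetD ((PySem.List.pyRange 0 n).foldl (fun p i => p ++ [PySem.List.pyGetD p (-1) 0 + PySem.Str.len (PySem.List.pyGetD words i "")]) [0]) (s + length) 0 - PySem.List.pyGetD ((PySem.List.pyRange 0 n).foldl (fun p i => p ++ [PySem.List.pyGetD p (-1) 0 + PySem.Str.len (PySem.List.pyGetD words i "")]) [0]) s 0 + length - 1) + 2 * length else best)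
            else best) best) st.2)) (harr, best)).2
    = ((PySem.List.pyRange t n).flatMap
        (fun L => (pvHlist words n L).map (fun c => (((c, L) : Int × Int), pvGroup words n L c)))).foldl
        (pvF n words) best := by
  intro m
  induction m with
  | zero =>
    intro t harr best ht1 htm hlen hinv
    rw [PySem.List.pyRange_one_eq_nil (a := t) (b := n) (by omega)]
    rfl
  | succ m ih =>
    intro t harr best ht1 htm hlen hinv
    have htn : t < n := by push_cast at htm; omega
    rw [PySem.List.pyRange_one_cons htn]
    simp only [List.foldl_cons, List.flatMap_cons, List.foldl_append]
    have hinner := pv_inner n words hn t ht1 (n - t + 1).toNat 0 harr PySem.Dict.empty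
      le_rfl (by omega) hlen (fun u hu0 hub => absurd hub (by omega)) (fun u hu0 hub => hinv u hu0 hub)
    rw [hinner.1]
    rw [pv_build_eq (PySem.List.pyRange 0 (n - t + 1)) (fun s => pvHcI words s t) (fun s => s)]
    rw [pv_build_items (PySem.List.pyRange 0 (n - t + 1)) (fun s => pvHcI words s t) (fun s => s)]
    rw [List.foldl_map]
    rw [PySem.List.foldl_congr_mem _ _
        (fun (b : Int) (c : Int) => pvF n words b ((c, t), pvGroup words n t c)) best ?_]
    · rw [← List.foldl_map (f := fun c : Int => (((c, t) : Int × Int), pvGroup words n t c))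
          (g := pvF n words)]
      rw [ih (t + 1) _ _ (by omega) (by push_cast at htm ⊢; omega) hinner.2.1 ?_]
      · rfl
      · intro u hu0 hub
        rw [show t + 1 - 1 = t by ring]
        exact hinner.2.2 u hu0 (by omega)
    · intro b c _
      have hmapid : ((PySem.List.pyRange 0 (n - t + 1)).filter
          (fun s => pvHcI words s t == c)).map (fun s => s) = pvGroup words n t c := by
        rw [List.map_id']
        rfl
      rw [hmapid]
      exact pv_groupbody n words hn t ht1 c b

theorem pv_B_eq_canon (n : Int) (words : List String)
    (hn : n ≤ (words.length : Int)) :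
    compute_min_length_after_abbreviation_alt n words = pvCanon n words := by
  unfold compute_min_length_after_abbreviation_alt
  simp only []
  rw [PySem.List.pyRepeat_singleton]
  by_cases hn1 : 1 ≤ n
  · rw [pv_outer n words hn (n - 1).toNat 1 (List.replicate n.toNat 0)
        ((words.map PySem.Str.len).sum + (n - 1)) le_rfl (by omega) (by simp) ?_]
    · rfl
    · intro u hu0 hub
      rw [PySem.List.pyGetD_eq_getElem _ 0 hu0 (by simp; omega), List.getElem_replicate]
      simp [pvHcI]
  · rw [PySem.List.pyRange_one_eq_nil (a := 1) (b := n) (by omega)]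
    unfold pvCanon pvItems
    rw [PySem.List.pyRange_one_eq_nil (a := 1) (b := n) (by omega)]
    rfl

-- ===== VERDICT (by name: the statement is the Claim_ definition above) =====
theorem compute_min_length_after_abbreviation_spec : Claim_equal_compute_min_length_after_abbreviation := by
  intro n words _ hpre
  unfold Spec_compute_min_length_after_abbreviation
  rw [pv_A_eq_canon n words hpre, pv_B_eq_canon n words hpre]
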